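-- pv_equiv track=rewrite | github.com/thehalleyyoung/diversity-decoding | implementation/src/data/preprocessing.py | exact_duplicates
-- ===== SOURCE A (Python) =====
-- from typing import (
--     Any,
--     Callable,
--     Dict,
--     FrozenSet,
--     List,
--     Optional,
--     Set,
--     Tuple,
--     Union,
-- )
--
-- def exact_duplicates(texts: List[str]) -> Set[int]:
--     """Return indices of texts that are exact duplicates of an earlier text."""
--     seen: Dict[str, int] = {}
--     duplicates: Set[int] = set()
--     for i, text in enumerate(texts):
--         key = text.strip()
--         if key in seen:
--             duplicates.add(i)
--         else:
--             seen[key] = i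
--     return duplicates
-- ===== SOURCE B (Python) =====
-- from typing import Dict, List, Set
--
-- def exact_duplicates(texts: List[str]) -> Set[int]:
--     """Return indices of texts that are exact duplicates of an earlier text."""
--     first: Dict[str, int] = {}
--     for i in reversed(range(len(texts))):
--         first[texts[i].strip()] = i
--     return set(range(len(texts))) - set(first.values())
-- ===== Notes on version B (the rewrite author's own statement) =====
-- stated objective: alternative
-- what changed: A makes one forward pass with a membership branch that collects later occurrences directly; B never tests membership: it sweeps the indices BACKWARDS letting dict overwrites keep only each key's first (smallest) index, then returns the complement set(range(n)) - set(first.values()).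
import Mathlib
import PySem

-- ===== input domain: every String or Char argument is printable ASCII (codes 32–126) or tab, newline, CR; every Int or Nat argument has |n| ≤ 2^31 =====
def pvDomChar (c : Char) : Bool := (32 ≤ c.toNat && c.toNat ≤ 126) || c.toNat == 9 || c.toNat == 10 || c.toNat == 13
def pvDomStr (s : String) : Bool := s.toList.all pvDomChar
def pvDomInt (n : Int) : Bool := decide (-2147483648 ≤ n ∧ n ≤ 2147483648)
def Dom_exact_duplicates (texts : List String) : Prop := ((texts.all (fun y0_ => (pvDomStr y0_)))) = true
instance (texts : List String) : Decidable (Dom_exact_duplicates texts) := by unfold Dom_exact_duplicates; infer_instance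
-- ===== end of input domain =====

-- B replaces A's forward pass with membership branch by a backward overwrite sweep
-- (dict keeps each key's smallest index) followed by a set difference; same cost.

-- ===== PORT A =====
-- one forward pass: seen : dict key → first index, duplicates : set of indices
def exact_duplicates (texts : List String) : List Int :=
  ((PySem.List.enumerate texts).foldl
    (fun (p : PySem.Dict String Int × PySem.Set Int) it =>
      if p.1.contains (PySem.Str.strip it.2) then
        (p.1, PySem.Set.add p.2 it.1)
      else
        (p.1.insert (PySem.Str.strip it.2) it.1, p.2))
    (PySem.Dict.empty, PySem.Set.empty)).2

-- ===== PORT B =====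
-- for i in reversed(range(len(texts))): first[texts[i].strip()] = i
-- return set(range(len(texts))) - set(first.values())
def exact_duplicates_alt (texts : List String) : List Int :=
  let n : Int := (texts.length : Int)
  let first : PySem.Dict String Int :=
    ((PySem.List.pyRange 0 n 1).reverse).foldl
      (fun (d : PySem.Dict String Int) i =>
        d.insert (PySem.Str.strip (PySem.List.pyGetD texts i "")) i)
      PySem.Dict.empty
  PySem.Set.diff (PySem.Set.ofList (PySem.List.pyRange 0 n 1))
    (PySem.Set.ofList first.values)

-- ===== PRECONDITION & SPEC =====
def Spec_exact_duplicates (texts : List String) (out : List Int) : Prop := out = exact_duplicates_alt texts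
instance (texts : List String) (out : List Int) : Decidable (Spec_exact_duplicates texts out) := by unfold Spec_exact_duplicates; infer_instance

-- ===== CLAIM (what is proved, stated in full; the proofs are below) =====
def Claim_equal_exact_duplicates : Prop := ∀ (texts : List String), Dom_exact_duplicates texts → Spec_exact_duplicates texts (exact_duplicates texts)

-- ===== LEMMAS AND PROOFS =====

-- the stripped key of texts[i]
def pvKey (texts : List String) (i : Int) : String :=
  PySem.Str.strip (PySem.List.pyGetD texts i "")

-- "texts[i] is a duplicate of an earlier text" as a Bool on the index
def pvDup (texts : List String) (i : Int) : Bool :=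
  ((texts.take i.toNat).map PySem.Str.strip).contains
    (PySem.Str.strip (texts.getD i.toNat ""))

-- reference recursion shared by both proofs: scan ts from index i with seen-key set K
def pvDupsFrom (ts : List String) (i : Int) (K : PySem.Set String) : List Int :=
  match ts with
  | [] => []
  | t :: r =>
    if PySem.Set.contains K (PySem.Str.strip t) then
      i :: pvDupsFrom r (i + 1) K
    else
      pvDupsFrom r (i + 1) (PySem.Set.add K (PySem.Str.strip t))

theorem set_contains_eq_decide {a : Type} [BEq a] [LawfulBEq a] (s : PySem.Set a) (x : a) :
    PySem.Set.contains s x = decide (x ∈ s) := by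
  rw [Bool.eq_iff_iff]
  simp

theorem A_fold (ts : List String) : ∀ (i0 : Int) (d : PySem.Dict String Int)
    (s : PySem.Set Int) (K : PySem.Set String),
    (∀ k, d.contains k = PySem.Set.contains K k) →
    (∀ x ∈ s, x < i0) →
    ((PySem.List.enumerate ts i0).foldl
      (fun (p : PySem.Dict String Int × PySem.Set Int) it =>
        if p.1.contains (PySem.Str.strip it.2) then
          (p.1, PySem.Set.add p.2 it.1)
        else
          (p.1.insert (PySem.Str.strip it.2) it.1, p.2))
      (d, s)).2 = s ++ pvDupsFrom ts i0 K := by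
  induction ts with
  | nil => intro i0 d s K hK hs; simp [PySem.List.enumerate, pvDupsFrom]
  | cons t r ih =>
    intro i0 d s K hK hs
    rw [PySem.List.enumerate_cons, List.foldl_cons]
    by_cases hc : PySem.Set.contains K (PySem.Str.strip t) = true
    · rw [if_pos (by rw [hK]; exact hc)]
      have hadd : PySem.Set.add s i0 = s ++ [i0] :=
        PySem.Set.add_of_not_mem (fun hmem => lt_irrefl i0 (hs i0 hmem))
      rw [ih (i0 + 1) d (PySem.Set.add s i0) K hK
          (by intro x hx; rw [hadd] at hx
              rcases List.mem_append.mp hx with h | h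
              · exact lt_trans (hs x h) (by omega)
              · simp at h; omega),
        hadd, pvDupsFrom, if_pos hc]
      simp
    · rw [if_neg (by rw [hK]; exact hc)]
      have hK' : ∀ k, (d.insert (PySem.Str.strip t) i0).contains k =
          PySem.Set.contains (PySem.Set.add K (PySem.Str.strip t)) k := by
        intro k
        rw [PySem.Dict.contains_insert, hK, set_contains_eq_decide, set_contains_eq_decide,
          Bool.eq_iff_iff]
        simp [PySem.Set.mem_add]
        by_cases hk : k = PySem.Str.strip t <;> simp [hk]
      rw [ih (i0 + 1) _ s (PySem.Set.add K (PySem.Str.strip t)) hK'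
          (fun x hx => lt_trans (hs x hx) (by omega)),
        pvDupsFrom, if_neg hc]

theorem dupsFrom_eq (ts : List String) : ∀ (pre full : List String), full = pre ++ ts →
    pvDupsFrom ts (pre.length : Int) (PySem.Set.ofList (pre.map PySem.Str.strip)) =
    (PySem.List.pyRange (pre.length : Int) ((pre.length : Int) + ts.length) 1).filter
      (fun i => pvDup full i) := by
  induction ts with
  | nil =>
    intro pre full hfull
    rw [pvDupsFrom, PySem.List.pyRange_one_eq_nil (by simp), List.filter_nil]
  | cons t r ih =>
    intro pre full hfull
    have hrange : PySem.List.pyRange (pre.length : Int)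
        ((pre.length : Int) + ((t :: r).length : Nat)) 1 =
        (pre.length : Int) :: PySem.List.pyRange ((pre.length : Int) + 1)
          ((pre.length : Int) + ((t :: r).length : Nat)) 1 :=
      PySem.List.pyRange_one_cons (by simp)
    have hofl : PySem.Set.ofList ((pre ++ [t]).map PySem.Str.strip) =
        PySem.Set.add (PySem.Set.ofList (pre.map PySem.Str.strip)) (PySem.Str.strip t) := by
      rw [List.map_append]
      exact PySem.Set.ofList_append_singleton _ _
    have hfull' : full = (pre ++ [t]) ++ r := by rw [hfull]; simp
    have hpd : pvDup full (pre.length : Int) =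
        PySem.Set.contains (PySem.Set.ofList (pre.map PySem.Str.strip)) (PySem.Str.strip t) := by
      rw [set_contains_eq_decide, pvDup, hfull]
      have h1 : ((pre.length : Int)).toNat = pre.length := by omega
      rw [h1, List.take_left, List.getD_eq_getElem?_getD,
        List.getElem?_append_right (le_refl _)]
      simp [PySem.Set.mem_ofList]
    have hlen1 : ((pre ++ [t]).length : Int) = (pre.length : Int) + 1 := by simp
    rw [hrange, List.filter_cons, pvDupsFrom]
    by_cases hc : PySem.Set.contains (PySem.Set.ofList (pre.map PySem.Str.strip))
        (PySem.Str.strip t) = true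
    · rw [if_pos hc]
      have hK : PySem.Set.ofList ((pre ++ [t]).map PySem.Str.strip) =
          PySem.Set.ofList (pre.map PySem.Str.strip) := by
        rw [hofl]
        exact PySem.Set.add_of_mem ((PySem.Set.contains_iff _ _).mp hc)
      have := ih (pre ++ [t]) full hfull'
      rw [hK, hlen1] at this
      rw [show ((pre.length : Int) + 1) + ((r.length : Nat) : Int) =
          (pre.length : Int) + (((t :: r).length : Nat) : Int) by push_cast [List.length_cons]; ring] at this
      rw [hpd, hc, if_pos rfl, ← this]
    · rw [if_neg hc]
      have := ih (pre ++ [t]) full hfull'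
      rw [hofl, hlen1] at this
      rw [show ((pre.length : Int) + 1) + ((r.length : Nat) : Int) =
          (pre.length : Int) + (((t :: r).length : Nat) : Int) by push_cast [List.length_cons]; ring] at this
      rw [hpd]
      simp only [Bool.not_eq_true] at hc
      rw [hc, if_neg Bool.false_ne_true, ← this]

theorem firstD_get? (texts : List String) : ∀ (l : List Int) (k : String),
    (l.foldr (fun i d => d.insert (pvKey texts i) i) PySem.Dict.empty).get? k =
    l.find? (fun i => pvKey texts i == k) := by
  intro l
  induction l with
  | nil => intro k; simp [PySem.Dict.get?_empty]
  | cons i r ih =>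
    intro k
    rw [List.foldr_cons, PySem.Dict.get?_insert, List.find?_cons]
    by_cases hk : pvKey texts i = k
    · rw [if_pos hk.symm, show (pvKey texts i == k) = true from beq_iff_eq.mpr hk]
    · rw [if_neg (fun h => hk h.symm), ih,
        show (pvKey texts i == k) = false from beq_eq_false_iff_ne.mpr hk]

theorem find?_pyRange (p : Int → Bool) : ∀ (n : Nat) (a i : Int), a ≤ i → i < a + n →
    ((PySem.List.pyRange a (a + n) 1).find? p = some i ↔
      p i = true ∧ ∀ j, a ≤ j → j < i → p j = false) := by
  intro n
  induction n with
  | zero => intro a i h1 h2; omega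
  | succ n ih =>
    intro a i h1 h2
    rw [PySem.List.pyRange_one_cons (by omega), List.find?_cons]
    cases hpa : p a with
    | true =>
      simp only
      constructor
      · intro h
        have hia : i = a := by injection h with h; omega
        subst hia
        exact ⟨hpa, fun j hj1 hj2 => absurd (le_trans h1 hj1) (not_le.mpr hj2)⟩
      · rintro ⟨hp, hall⟩
        by_cases hia : i = a
        · rw [hia]
        · exact absurd hpa (by rw [hall a (le_refl _) (by omega)]; simp)
    | false =>
      simp only
      by_cases hia : i = a
      · subst hia
        constructor
        · intro h
          have := List.mem_of_find?_eq_some h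
          rw [PySem.List.mem_pyRange_one] at this
          omega
        · rintro ⟨hp, _⟩
          rw [hpa] at hp
          exact absurd hp (by simp)
      · have h1' : a + 1 ≤ i := by omega
        have h2' : i < (a + 1) + n := by omega
        have heq : a + (n + 1 : Nat) = (a + 1) + (n : Nat) := by push_cast; ring
        rw [heq, ih (a + 1) i h1' h2']
        constructor
        · rintro ⟨hp, hall⟩
          exact ⟨hp, fun j hj1 hj2 => by
            by_cases hja : j = a
            · rw [hja]; exact hpa
            · exact hall j (by omega) hj2⟩
        · rintro ⟨hp, hall⟩
          exact ⟨hp, fun j hj1 hj2 => hall j (by omega) hj2⟩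

-- the dict B builds: a lookup at k returns the first index of the range whose key is k
theorem firstdict_get? (texts : List String) (k : String) :
    (((PySem.List.pyRange 0 (texts.length : Int) 1).reverse).foldl
      (fun (d : PySem.Dict String Int) i =>
        d.insert (PySem.Str.strip (PySem.List.pyGetD texts i "")) i)
      PySem.Dict.empty).get? k =
    (PySem.List.pyRange 0 (texts.length : Int) 1).find? (fun i => pvKey texts i == k) := by
  rw [List.foldl_reverse]
  exact firstD_get? texts _ k

theorem firstdict_nodup_keys (texts : List String) :
    (((PySem.List.pyRange 0 (texts.length : Int) 1).reverse).foldl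
      (fun (d : PySem.Dict String Int) i =>
        d.insert (PySem.Str.strip (PySem.List.pyGetD texts i "")) i)
      PySem.Dict.empty).keys.Nodup := by
  exact PySem.Dict.nodup_keys_foldl_insert_key _ (fun i => PySem.Str.strip (PySem.List.pyGetD texts i ""))
    (fun _ i => i) PySem.Dict.empty (by simp)

theorem mem_values_first (texts : List String) (v : Int) :
    v ∈ (((PySem.List.pyRange 0 (texts.length : Int) 1).reverse).foldl
      (fun (d : PySem.Dict String Int) i =>
        d.insert (PySem.Str.strip (PySem.List.pyGetD texts i "")) i)
      PySem.Dict.empty).values ↔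
    (PySem.List.pyRange 0 (texts.length : Int) 1).find?
      (fun i => pvKey texts i == pvKey texts v) = some v := by
  constructor
  · intro hv
    simp only [PySem.Dict.values, List.mem_map] at hv
    obtain ⟨⟨k, w⟩, hmem, hw⟩ := hv
    simp only at hw
    have hget := PySem.Dict.get?_of_mem_items _ hmem (firstdict_nodup_keys texts)
    rw [firstdict_get? texts k] at hget
    have hb := List.find?_some hget
    have hkey : pvKey texts w = k := eq_of_beq hb
    rw [← hkey] at hget
    rw [← hw]
    exact hget
  · intro hf
    have hget : (((PySem.List.pyRange 0 (texts.length : Int) 1).reverse).foldl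
        (fun (d : PySem.Dict String Int) i =>
          d.insert (PySem.Str.strip (PySem.List.pyGetD texts i "")) i)
        PySem.Dict.empty).get? (pvKey texts v) = some v := by
      rw [firstdict_get?]; exact hf
    have := PySem.Dict.mem_items_of_get?_eq_some _ hget
    simp only [PySem.Dict.values, List.mem_map]
    exact ⟨(pvKey texts v, v), this, rfl⟩

theorem pvDup_iff (texts : List String) (i : Int) (h0 : 0 ≤ i) (h1 : i < texts.length) :
    pvDup texts i = true ↔ ∃ j : Int, 0 ≤ j ∧ j < i ∧ pvKey texts j = pvKey texts i := by
  rw [pvDup]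
  have hi : i.toNat < texts.length := by omega
  rw [List.contains_iff_mem, List.mem_map]
  constructor
  · rintro ⟨x, hx, hsx⟩
    rw [List.mem_iff_getElem] at hx
    obtain ⟨m, hm, hxm⟩ := hx
    have hmlen : m < texts.length := lt_of_lt_of_le hm (by simp [List.length_take])
    have hmi : m < i.toNat := lt_of_lt_of_le hm (by simp [List.length_take])
    refine ⟨(m : Int), by omega, by omega, ?_⟩
    rw [pvKey, pvKey, PySem.List.pyGetD_of_nonneg _ _ (by omega),
      PySem.List.pyGetD_of_nonneg _ _ h0]
    rw [List.getElem_take] at hxm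
    simp only [Int.toNat_natCast]
    rw [List.getD_eq_getElem _ _ (by omega), List.getD_eq_getElem _ _ (by omega)]
    rw [hxm, hsx, List.getD_eq_getElem _ _ hi]
  · rintro ⟨j, hj0, hji, hkey⟩
    have hjlen : j.toNat < texts.length := by omega
    refine ⟨texts[j.toNat], ?_, ?_⟩
    · rw [List.mem_iff_getElem]
      exact ⟨j.toNat, by simp [List.length_take]; omega, by rw [List.getElem_take]⟩
    · rw [pvKey, pvKey, PySem.List.pyGetD_of_nonneg _ _ hj0,
        PySem.List.pyGetD_of_nonneg _ _ h0] at hkey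
      rw [List.getD_eq_getElem _ _ hjlen] at hkey
      rw [hkey, List.getD_eq_getElem _ _ hi]

theorem B_char (texts : List String) :
    exact_duplicates_alt texts =
    (PySem.List.pyRange 0 (texts.length : Int) 1).filter (fun i => pvDup texts i) := by
  unfold exact_duplicates_alt
  simp only [PySem.Set.diff]
  rw [PySem.Set.ofList_eq_self_of_nodup _ (PySem.List.nodup_pyRange_one 0 _)]
  apply List.filter_congr
  intro i hi
  rw [PySem.List.mem_pyRange_one] at hi
  obtain ⟨hi0, hi1⟩ := hi
  have hfind := find?_pyRange (fun j => pvKey texts j == pvKey texts i) texts.length 0 i hi0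
    (by omega)
  rw [zero_add] at hfind
  have hvals := mem_values_first texts i
  cases hP : pvDup texts i with
  | true =>
    obtain ⟨j, hj0, hji, hkey⟩ := (pvDup_iff texts i hi0 hi1).mp hP
    have hnot : i ∉ (((PySem.List.pyRange 0 (texts.length : Int) 1).reverse).foldl
        (fun (d : PySem.Dict String Int) i =>
          d.insert (PySem.Str.strip (PySem.List.pyGetD texts i "")) i)
        PySem.Dict.empty).values := by
      rw [hvals, hfind]
      rintro ⟨-, hall⟩
      have := hall j hj0 hji
      rw [beq_eq_false_iff_ne] at this
      exact this hkey
    rw [List.foldl_reverse] at hnot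
    simp [PySem.Set.mem_ofList, hnot]
  | false =>
    have hmem : i ∈ (((PySem.List.pyRange 0 (texts.length : Int) 1).reverse).foldl
        (fun (d : PySem.Dict String Int) i =>
          d.insert (PySem.Str.strip (PySem.List.pyGetD texts i "")) i)
        PySem.Dict.empty).values := by
      rw [hvals, hfind]
      refine ⟨by simp, fun j hj0 hji => ?_⟩
      rw [beq_eq_false_iff_ne]
      intro hk
      exact absurd ((pvDup_iff texts i hi0 hi1).mpr ⟨j, hj0, hji, hk⟩) (by rw [hP]; simp)
    rw [List.foldl_reverse] at hmem
    simp [PySem.Set.mem_ofList, hmem]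

-- ===== VERDICT (by name: the statement is the Claim_ definition above) =====
theorem exact_duplicates_spec : Claim_equal_exact_duplicates := by
  intro texts _
  unfold Spec_exact_duplicates
  rw [B_char]
  unfold exact_duplicates
  rw [A_fold texts 0 PySem.Dict.empty PySem.Set.empty PySem.Set.empty
      (fun k => by simp [PySem.Dict.contains_empty, PySem.Set.contains, PySem.Set.empty])
      (by intro x hx; simp [PySem.Set.empty] at hx)]
  have := dupsFrom_eq texts [] texts (by simp)
  simp only [List.length_nil, Nat.cast_zero, List.map_nil, PySem.Set.ofList_nil,
    zero_add] at this
  simpa [PySem.Set.empty] using this
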